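-- pv_equiv track=rewrite | github.com/dungeonsanddifference/bf-interpreter | 02_batch.py | parse_code
-- ===== SOURCE A (Python) =====
-- def parse_code(raw: str) -> list[tuple[str, int]]:
--     # Create an ir and collapse repeated operations
--     ops = []
--     last = None # last character
--     count = 0 # count of consecutive characters
--
--     for c in raw:
--         if c not in "+-<>.,[]":
--             continue
--
--         if c == last:
--             count += 1
--         else:
--             if last is not None:
--                 ops.append((last, count))
--             last = c
--             count = 1
--
--     if last is not None:
--         ops.append((last, count))
--
--     return ops
-- ===== SOURCE B (Python) =====
-- def _rle(f: list[str]) -> list[tuple[str, int]]: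
--     # divide-and-conquer run-length encoding
--     n = len(f)
--     if n == 0:
--         return []
--     if n == 1:
--         return [(f[0], 1)]
--     left = _rle(f[:n // 2])
--     right = _rle(f[n // 2:])
--     if left[-1][0] == right[0][0]:
--         return left[:-1] + [(left[-1][0], left[-1][1] + right[0][1])] + right[1:]
--     return left + right
--
--
-- def parse_code(raw: str) -> list[tuple[str, int]]:
--     return _rle([c for c in raw if c in "+-<>.,[]"])
-- ===== Notes on version B (the rewrite author's own statement) =====
-- stated objective: alternative
-- what changed: A's single-pass last/count state machine is replaced by filtering to operator characters and then run-length encoding by divide and conquer: split the filtered list in half, recurse, and merge the two run lists, fusing the boundary runs when their characters match.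
import Mathlib
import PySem

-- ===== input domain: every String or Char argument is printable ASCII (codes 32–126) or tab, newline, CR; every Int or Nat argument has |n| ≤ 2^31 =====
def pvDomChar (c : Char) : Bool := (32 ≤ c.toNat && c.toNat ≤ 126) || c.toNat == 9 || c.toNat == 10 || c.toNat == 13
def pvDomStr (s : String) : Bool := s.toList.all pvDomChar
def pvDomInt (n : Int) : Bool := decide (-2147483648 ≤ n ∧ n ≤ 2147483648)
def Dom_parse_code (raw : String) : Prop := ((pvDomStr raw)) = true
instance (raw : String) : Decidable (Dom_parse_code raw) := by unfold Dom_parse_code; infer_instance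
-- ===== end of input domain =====

-- B replaces A's single-pass last/count state machine by filter + divide-and-conquer
-- run-length encoding (split in half, recurse, merge boundary runs) — an alternative
-- algorithm of similar cost.

-- ===== PORT A =====
-- Python: `c in "+-<>.,[]"` for a single char c = char membership in that string
def pcIsOp (c : Char) : Bool := "+-<>.,[]".toList.contains c

-- state = (ops, last, count); c == last is False while last is None
def pcStepA (st : List (String × Int) × Option Char × Int) (c : Char) :
    List (String × Int) × Option Char × Int :=
  if pcIsOp c then
    match st with
    | (ops, some l, cnt) =>
        if c = l then (ops, some l, cnt + 1)
        else (ops ++ [(String.ofList [l], cnt)], some c, 1)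
    | (ops, none, _) => (ops, some c, 1)
  else st

def pcFlush (st : List (String × Int) × Option Char × Int) : List (String × Int)  :=
  match st with
  | (ops, some l, cnt) => ops ++ [(String.ofList [l], cnt)]
  | (ops, none, _) => ops

def parse_code (raw : String) : List (String × Int) :=
  pcFlush (raw.toList.foldl pcStepA ([], none, 0))

-- ===== PORT B =====
-- merge of two run lists: fuse L[-1] with R[0] if their characters match
-- (Source B indexes L[-1]/R[0] unconditionally; at every call site both are nonempty,
--  the match here only makes the definition total)
def pcMerge (L R : List (String × Int)) : List (String × Int) :=
  match L.getLast?, R with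
  | some (s, n), (t, m) :: rs =>
      if s = t then L.dropLast ++ (s, n + m) :: rs else L ++ R
  | _, _ => L ++ R

-- _rle: divide and conquer on the filtered list; the Nat fuel (initially the list's
-- length, always sufficient since each half is strictly shorter) only makes the
-- recursion structural — the computation is Source B's
def pcRLEGo : Nat → List Char → List (String × Int)
  | _, [] => []
  | _, [x] => [(String.ofList [x], 1)]
  | 0, _ => []
  | n + 1, x :: y :: xs =>
      pcMerge (pcRLEGo n ((x :: y :: xs).take ((x :: y :: xs).length / 2)))
              (pcRLEGo n ((x :: y :: xs).drop ((x :: y :: xs).length / 2)))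

def pcRLE (f : List Char) : List (String × Int) := pcRLEGo f.length f

def parse_code_alt (raw : String) : List (String × Int) :=
  pcRLE (raw.toList.filter pcIsOp)

-- ===== PRECONDITION & SPEC =====
def Spec_parse_code (raw : String) (out : List (String × Int)) : Prop := out = parse_code_alt raw
instance (raw : String) (out : List (String × Int)) : Decidable (Spec_parse_code raw out) := by unfold Spec_parse_code; infer_instance

-- ===== CLAIM (what is proved, stated in full; the proofs are below) =====
def Claim_equal_parse_code : Prop := ∀ (raw : String), Dom_parse_code raw → Spec_parse_code raw (parse_code raw)

-- ===== LEMMAS AND PROOFS =====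

-- A's loop skips non-operators, so it folds over the filtered list
def pcStepCore (st : List (String × Int) × Option Char × Int) (c : Char) :
    List (String × Int) × Option Char × Int :=
  match st with
  | (ops, some l, cnt) =>
      if c = l then (ops, some l, cnt + 1)
      else (ops ++ [(String.ofList [l], cnt)], some c, 1)
  | (ops, none, _) => (ops, some c, 1)

theorem pcFoldA_filter (xs : List Char) (st : List (String × Int) × Option Char × Int) :
    xs.foldl pcStepA st = (xs.filter pcIsOp).foldl pcStepCore st := by
  induction xs generalizing st with
  | nil => rfl
  | cons x xs ih =>
      by_cases h : pcIsOp x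
      · simp only [List.foldl, List.filter, h]
        rw [show pcStepA st x = pcStepCore st x from by simp [pcStepA, pcStepCore, h]]
        exact ih _
      · simp only [List.foldl, List.filter, h]
        rw [show pcStepA st x = st by simp [pcStepA, h]]
        exact ih st

-- run-length encoding with a carried open run
def pcGrp (l : Char) (c : Int) : List Char → List (String × Int)
  | [] => [(String.ofList [l], c)]
  | x :: xs => if x = l then pcGrp l (c + 1) xs else (String.ofList [l], c) :: pcGrp x 1 xs

-- reference run-length encoding (proof-side only)
def pcGroups : List Char → List (String × Int)
  | [] => []
  | x :: xs => pcGrp x 1 xs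

theorem pcGrp_eq (l : Char) (c : Int) (xs : List Char) :
    pcGrp l c xs
      = (String.ofList [l], c + (xs.takeWhile (· == l)).length)
          :: pcGroups (xs.dropWhile (· == l)) := by
  induction xs generalizing l c with
  | nil => simp [pcGrp, pcGroups]
  | cons x xs ih =>
      by_cases h : x = l
      · subst h
        simp only [pcGrp, List.takeWhile, List.dropWhile, beq_self_eq_true,
          if_true, ih, List.length_cons]
        push_cast
        ring_nf
      · have hb : (x == l) = false := beq_eq_false_iff_ne.mpr h
        rw [pcGrp, if_neg h]
        rw [show (x :: xs).takeWhile (· == l) = [] from by simp [hb],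
            show (x :: xs).dropWhile (· == l) = x :: xs from by simp [hb],
            show pcGroups (x :: xs) = pcGrp x 1 xs from rfl]
        norm_num

-- the cons-equation of pcGroups in takeWhile/dropWhile form
theorem pcGroups_cons_eq (x : Char) (xs : List Char) :
    pcGroups (x :: xs)
      = (String.ofList [x], ((xs.takeWhile (· == x)).length + 1 : Int))
          :: pcGroups (xs.dropWhile (· == x)) := by
  show pcGrp x 1 xs = _
  rw [pcGrp_eq]
  ring_nf

theorem pcFoldCore_some (xs : List Char) (ops : List (String × Int)) (l : Char) (c : Int) :
    pcFlush (xs.foldl pcStepCore (ops, some l, c)) = ops ++ pcGrp l c xs := by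
  induction xs generalizing ops l c with
  | nil => simp [pcFlush, pcGrp]
  | cons x xs ih =>
      by_cases h : x = l
      · simp [List.foldl, pcStepCore, h, ih, pcGrp]
      · simp [List.foldl, pcStepCore, h, ih, pcGrp]

theorem pcFoldCore_none (xs : List Char) :
    pcFlush (xs.foldl pcStepCore ([], none, 0)) = pcGroups xs := by
  cases xs with
  | nil => simp [pcFlush, pcGroups]
  | cons x xs =>
      simp only [List.foldl, pcStepCore]
      rw [pcFoldCore_some]
      simp [pcGroups]

-- single-char strings are equal iff the chars are
theorem pcOfList_inj (x y : Char) : String.ofList [x] = String.ofList [y] ↔ x = y := by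
  constructor
  · intro h
    have := congrArg String.toList h
    simpa using this
  · intro h; rw [h]

theorem pcGroups_nil : pcGroups [] = [] := rfl

theorem pcGroups_ne_nil (x : Char) (xs : List Char) : pcGroups (x :: xs) ≠ [] := by
  rw [pcGroups_cons_eq]; simp

theorem pcMerge_nil (L : List (String × Int)) : pcMerge L [] = L := by
  rcases h : L.getLast? with _ | ⟨s, n⟩ <;> simp [pcMerge, h]

-- pcMerge skips past a fixed prefix while the left tail stays nonempty
theorem pcMerge_cons (a : String × Int) (L R : List (String × Int)) (hL : L ≠ []) :
    pcMerge (a :: L) R = a :: pcMerge L R := by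
  cases L with
  | nil => exact absurd rfl hL
  | cons b L' =>
    rcases hls : (b :: L').getLast? with _ | ⟨s, n⟩
    · simp at hls
    · cases R with
      | nil => simp [pcMerge, hls]
      | cons q rs =>
          obtain ⟨t, m⟩ := q
          by_cases h : s = t <;>
            simp [pcMerge, hls, h]

-- the key lemma: merging the run lists of two pieces gives the run list of the whole
theorem pcGroups_append (xs ys : List Char) :
    pcMerge (pcGroups xs) (pcGroups ys) = pcGroups (xs ++ ys) := by
  induction hn : xs.length using Nat.strong_induction_on generalizing xs with
  | _ n ih =>
  cases xs with
  | nil =>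
      rw [pcGroups_nil, List.nil_append]
      rcases hys : pcGroups ys with _ | ⟨p, ps⟩ <;> simp [pcMerge]
  | cons x xs' =>
    cases ys with
    | nil => rw [List.append_nil, pcGroups_nil, pcMerge_nil]
    | cons y ys' =>
      by_cases hd : xs'.dropWhile (· == x) = []
      · -- the whole of x :: xs' is a single run of x
        have ht : xs'.takeWhile (· == x) = xs' := by
          have h := List.takeWhile_append_dropWhile (p := (· == x)) (l := xs')
          rw [hd, List.append_nil] at h; exact h
        by_cases hxy : x = y
        · subst hxy
          -- boundary runs fuse
          conv_lhs => rw [pcGroups_cons_eq, pcGroups_cons_eq]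
          rw [hd, pcGroups_nil]
          conv_rhs => rw [List.cons_append, pcGroups_cons_eq]
          rw [List.takeWhile_append, if_pos (by rw [ht]),
              List.dropWhile_append, if_pos (by simp [hd])]
          rw [show (x :: ys').takeWhile (· == x) = x :: ys'.takeWhile (· == x) from by simp,
              show (x :: ys').dropWhile (· == x) = ys'.dropWhile (· == x) from by simp]
          rw [ht]
          simp only [pcMerge, List.getLast?_singleton]
          rw [if_true]
          simp only [List.dropLast_singleton, List.nil_append]
          congr 2
          push_cast [List.length_append, List.length_cons]
          ring
        · -- boundary runs do not fuse
          have hb : (y == x) = false :=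
            beq_eq_false_iff_ne.mpr (fun h => hxy h.symm)
          have hs : String.ofList [x] ≠ String.ofList [y] :=
            fun h => hxy ((pcOfList_inj x y).mp h)
          conv_lhs => rw [pcGroups_cons_eq]
          rw [hd, pcGroups_nil]
          conv_rhs => rw [List.cons_append, pcGroups_cons_eq]
          rw [List.takeWhile_append, if_pos (by rw [ht]),
              List.dropWhile_append, if_pos (by simp [hd])]
          rw [show (y :: ys').takeWhile (· == x) = [] from by simp [hb],
              show (y :: ys').dropWhile (· == x) = y :: ys' from by simp [hb]]
          rw [ht, List.append_nil]
          rw [pcGroups_cons_eq]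
          simp [pcMerge, hs]
      · -- x :: xs' has several runs: peel the first one off both sides
        obtain ⟨d, ds, hdd⟩ : ∃ d ds, xs'.dropWhile (· == x) = d :: ds := by
          cases h' : xs'.dropWhile (· == x) with
          | nil => exact absurd h' hd
          | cons d ds => exact ⟨d, ds, rfl⟩
        have hne : pcGroups (xs'.dropWhile (· == x)) ≠ [] := by
          rw [hdd]; exact pcGroups_ne_nil d ds
        have hlen : (xs'.dropWhile (· == x)).length < n := by
          subst hn
          simp only [List.length_cons]
          exact Nat.lt_succ_of_le (List.length_dropWhile_le _ _)
        have hlen_ne : ¬ (xs'.takeWhile (· == x)).length = xs'.length := by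
          intro h
          have h2 := congrArg List.length (List.takeWhile_append_dropWhile (p := (· == x)) (l := xs'))
          rw [List.length_append] at h2
          exact hd (List.eq_nil_of_length_eq_zero (by omega))
        conv_lhs => rw [pcGroups_cons_eq]
        rw [pcMerge_cons _ _ _ hne, ih _ hlen _ rfl]
        conv_rhs => rw [List.cons_append, pcGroups_cons_eq]
        rw [List.takeWhile_append, if_neg hlen_ne,
            List.dropWhile_append, if_neg (by simpa [List.isEmpty_iff] using hd)]

-- the fuel never runs out while it bounds the length
theorem pcRLEGo_eq (n : Nat) : ∀ f : List Char, f.length ≤ n + 1 → pcRLEGo n f = pcGroups f := by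
  induction n with
  | zero =>
      intro f hf
      match f with
      | [] => rfl
      | [x] => rfl
      | x :: y :: xs => simp at hf
  | succ n ih =>
      intro f hf
      match f with
      | [] => rfl
      | [x] => rfl
      | x :: y :: xs =>
          rw [pcRLEGo]
          simp only [List.length_cons] at hf
          rw [ih _ (by simp only [List.length_take, List.length_cons]; omega),
              ih _ (by simp only [List.length_drop, List.length_cons]; omega),
              pcGroups_append, List.take_append_drop]

-- divide-and-conquer RLE computes the run list
theorem pcRLE_eq_groups (f : List Char) : pcRLE f = pcGroups f :=
  pcRLEGo_eq f.length f (Nat.le_succ _)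

-- ===== VERDICT (by name: the statement is the Claim_ definition above) =====
theorem parse_code_spec : Claim_equal_parse_code := by
  intro raw _
  show parse_code raw = parse_code_alt raw
  unfold parse_code parse_code_alt
  rw [pcFoldA_filter, pcFoldCore_none, pcRLE_eq_groups]
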